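-- pv_equiv track=rewrite | github.com/wannasleepforlong/TableTalk-Human-AI | t3.2_transcription_bart.py | merge_texts
-- ===== SOURCE A (Python) =====
-- def merge_texts(texts):
--     merged = texts[0]
--     for next_text in texts[1:]:
--         merged_words = merged.split()
--         next_words = next_text.split()
--         max_overlap = min(len(merged_words), len(next_words))
--         overlap_size = 0
--         for i in range(max_overlap, 0, -1):
--             if merged_words[-i:] == next_words[:i]:
--                 overlap_size = i
--                 break
--         merged = merged + " " + " ".join(next_words[overlap_size:])
--     return merged
-- ===== SOURCE B (Python) =====
-- def merge_texts(texts):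
--     parts = [texts[0]]
--     words = texts[0].split()
--     for next_text in texts[1:]:
--         nw = next_text.split()
--         k = min(len(words), len(nw))
--         s = nw + [None] + words[len(words) - k:]
--         pi = [0]
--         j = 0
--         for i in range(1, len(s)):
--             while j > 0 and s[i] != s[j]:
--                 j = pi[j - 1]
--             if s[i] == s[j]:
--                 j += 1
--             pi.append(j)
--         tail = nw[j:]
--         parts.append(" ".join(tail))
--         words += tail
--     return " ".join(parts)
-- ===== Notes on version B (the rewrite author's own statement) =====
-- stated objective: faster
-- what changed: B finds each overlap with a KMP failure-function over next_words + [None] + tail-of-running-word-list (linear in the piece length) instead of A's descending scan that compares whole slices for every candidate size, and it keeps the word list incrementally and joins collected pieces once instead of re-splitting and re-concatenating the growing merged string.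
import Mathlib
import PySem

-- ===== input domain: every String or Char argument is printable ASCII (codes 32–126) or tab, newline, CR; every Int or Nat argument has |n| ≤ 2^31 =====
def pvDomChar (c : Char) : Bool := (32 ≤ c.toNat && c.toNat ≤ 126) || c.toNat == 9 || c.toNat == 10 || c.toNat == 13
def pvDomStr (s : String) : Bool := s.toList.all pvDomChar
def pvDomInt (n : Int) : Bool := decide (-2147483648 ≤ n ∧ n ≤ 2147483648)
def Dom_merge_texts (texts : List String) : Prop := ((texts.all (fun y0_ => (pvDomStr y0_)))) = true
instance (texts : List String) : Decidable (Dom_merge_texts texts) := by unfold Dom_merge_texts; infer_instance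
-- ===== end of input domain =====

-- B finds each word-overlap with a KMP failure function over next_words ++ [None] ++ (tail of the
-- incrementally maintained running word list) instead of A's slice comparison per candidate size,
-- and joins the collected pieces once at the end; measured faster on large inputs.

-- ===== PORT A =====
-- A's inner loop 'for i in range(max_overlap, 0, -1): if …: overlap_size = i; break'
-- as the obvious descending structural recursion (break = stopping at the first match).
def mergeOverlapA (mw nw : List String) : Nat → Nat
  | 0 => 0
  | i + 1 =>
      if PySem.List.slice mw (some (-((i + 1 : Nat) : Int))) none ==
         PySem.List.slice nw none (some ((i + 1 : Nat) : Int)) then i + 1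
      else mergeOverlapA mw nw i

-- the body of A's 'for next_text in texts[1:]' loop
def mergeStepA (merged next_text : String) : String :=
  let merged_words := PySem.Str.split₀ merged
  let next_words := PySem.Str.split₀ next_text
  let max_overlap := min merged_words.length next_words.length
  let overlap_size := mergeOverlapA merged_words next_words max_overlap
  merged ++ " " ++ PySem.Str.join " " (PySem.List.slice next_words (some (overlap_size : Int)) none)

def merge_texts (texts : List String) : String :=
  match PySem.List.pyGet? texts 0 with     -- texts[0]; none = IndexError, excluded by Pre_
  | none => ""
  | some first => (PySem.List.slice texts (some 1) none).foldl mergeStepA first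

-- ===== PORT B =====
-- B's inner 'while j > 0 and s[i] != s[j]: j = pi[j - 1]' ; fuel = current j (it strictly
-- decreases each step, proved in kmpWhile_spec below), so fuel j computes exactly the while loop.
def kmpWhile (pi : List Nat) (s : List (Option String)) (si : Option String) : Nat → Nat → Nat
  | 0, j => j
  | f + 1, j =>
      if j ≠ 0 ∧ ¬ (s.getD j none = si) then kmpWhile pi s si f (pi.getD (j - 1) 0) else j

-- one iteration of B's 'for i in range(1, len(s))'; state = (pi, j)
def kmpStep (s : List (Option String)) (st : List Nat × Nat) (i : Nat) : List Nat × Nat :=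
  let j0 := kmpWhile st.1 s (s.getD i none) st.2 st.2
  let j := if s.getD i none = s.getD j0 none then j0 + 1 else j0
  (st.1 ++ [j], j)

-- 'pi = [0]; j = 0; for i in range(1, len(s)): …'
def kmpPi (s : List (Option String)) : List Nat × Nat :=
  (List.range' 1 (s.length - 1)).foldl (kmpStep s) ([0], 0)

-- the body of B's outer loop; state = (parts, words); None is the Python sentinel ⇒ Option String
def mergeStepB (st : List String × List String) (next_text : String) : List String × List String :=
  let nw := PySem.Str.split₀ next_text
  let ws := st.2
  let k := min ws.length nw.length
  let s := nw.map some ++ none :: ((PySem.List.slice ws (some ((ws.length : Int) - (k : Int))) none).map some)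
  let ov := (kmpPi s).2          -- final j of the KMP loop
  let tail := PySem.List.slice nw (some ((ov : Nat) : Int)) none
  (st.1 ++ [PySem.Str.join " " tail], ws ++ tail)

def merge_texts_alt (texts : List String) : String :=
  match texts with                         -- texts[0] raises on [], excluded by Pre_
  | [] => ""
  | first :: rest =>
      PySem.Str.join " " ((rest.foldl mergeStepB ([first], PySem.Str.split₀ first)).1)

-- ===== PRECONDITION & SPEC =====
-- Pre_ excludes only the empty list, on which both Pythons raise IndexError at texts[0].
def Pre_merge_texts (texts : List String) : Prop := texts ≠ []
instance (texts : List String) : Decidable (Pre_merge_texts texts) := by unfold Pre_merge_texts; infer_instance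
def pvWitness_merge_texts : List String := ["a b", "b c"]

def Spec_merge_texts (texts : List String) (out : String) : Prop := out = merge_texts_alt texts
instance (texts : List String) (out : String) : Decidable (Spec_merge_texts texts out) := by unfold Spec_merge_texts; infer_instance

-- ===== CLAIM (what is proved, stated in full; the proofs are below) =====
def Claim_equal_merge_texts : Prop := ∀ (texts : List String), Dom_merge_texts texts → Pre_merge_texts texts → Spec_merge_texts texts (merge_texts texts)

-- ===== LEMMAS AND PROOFS =====

-- ---------- border theory for the KMP failure function ----------

-- i is a (not necessarily proper) border length of u when the length-i prefix equals the length-i suffix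
abbrev BrdP (u : List (Option String)) (i : Nat) : Prop := u.take i = u.drop (u.length - i)

-- the longest proper border of u (0 when u has none)
def maxBrd (u : List (Option String)) : Nat := Nat.findGreatest (BrdP u) (u.length - 1)

lemma brdP_zero (u : List (Option String)) : BrdP u 0 := by
  simp [BrdP]

lemma maxBrd_le (u : List (Option String)) : maxBrd u ≤ u.length - 1 :=
  Nat.findGreatest_le _

lemma maxBrd_brd (u : List (Option String)) : BrdP u (maxBrd u) :=
  Nat.findGreatest_spec (Nat.zero_le _) (brdP_zero u)

lemma maxBrd_ge (u : List (Option String)) (i : Nat) (h : BrdP u i) (hi : i ≤ u.length - 1) :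
    i ≤ maxBrd u := Nat.le_findGreatest hi h

-- a border of a border is a border
lemma brd_up (u : List (Option String)) (a b : Nat) (hb : BrdP u b) (hbl : b ≤ u.length)
    (ha : BrdP (u.take b) a) (hab : a ≤ b) : BrdP u a := by
  have hlb : (u.take b).length = b := by rw [List.length_take]; omega
  unfold BrdP at *
  rw [hlb] at ha
  calc u.take a = (u.take b).take a := by rw [List.take_take, Nat.min_eq_left hab]
    _ = (u.take b).drop (b - a) := ha
    _ = (u.drop (u.length - b)).drop (b - a) := by rw [hb]
    _ = u.drop (u.length - a) := by rw [List.drop_drop]; congr 1; omega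

-- a shorter border is a border of a longer border
lemma brd_down (u : List (Option String)) (a b : Nat) (ha : BrdP u a) (hb : BrdP u b)
    (hab : a ≤ b) (hbl : b ≤ u.length) : BrdP (u.take b) a := by
  unfold BrdP at *
  rw [List.length_take, Nat.min_eq_left hbl, List.take_take, Nat.min_eq_left hab, hb,
    List.drop_drop, show u.length - b + (b - a) = u.length - a from by omega]
  exact ha

-- extending a border by one matching element
lemma brd_ext (s : List (Option String)) (p a : Nat) (hp : p < s.length) (hap : a + 1 ≤ p) :
    BrdP (s.take (p + 1)) (a + 1) ↔
      BrdP (s.take p) a ∧ s.getD a none = s.getD p none := by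
  have ha : a < s.length := by omega
  have htp : s.take (p + 1) = s.take p ++ [s.getD p none] := by
    rw [List.take_add_one, List.getElem?_eq_getElem hp, List.getD_eq_getElem s none hp]
    rfl
  have hta : s.take (a + 1) = s.take a ++ [s.getD a none] := by
    rw [List.take_add_one, List.getElem?_eq_getElem ha, List.getD_eq_getElem s none ha]
    rfl
  have hlen1 : (s.take (p + 1)).length = p + 1 := by rw [List.length_take]; omega
  have hlenp : (s.take p).length = p := by rw [List.length_take]; omega
  unfold BrdP
  rw [hlen1, hlenp]
  have h1 : (s.take (p + 1)).take (a + 1) = s.take a ++ [s.getD a none] := by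
    rw [List.take_take, Nat.min_eq_left (by omega)]; exact hta
  have h2 : (s.take (p + 1)).drop (p + 1 - (a + 1)) =
      (s.take p).drop (p - a) ++ [s.getD p none] := by
    rw [htp, List.drop_append, hlenp,
      show p + 1 - (a + 1) = p - a from by omega,
      show p - a - p = 0 from by omega]
    rfl
  rw [h1, h2, show (s.take p).take a = s.take a from by
    rw [List.take_take, Nat.min_eq_left (by omega)]]
  constructor
  · intro h
    have hlens : (s.take a).length = ((s.take p).drop (p - a)).length := by
      rw [List.length_take, List.length_drop, hlenp]; omega
    obtain ⟨he1, he2⟩ := List.append_inj h hlens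
    exact ⟨he1, by simpa using he2⟩
  · rintro ⟨h1', h2'⟩
    rw [h1', h2']

-- ---------- the while loop finds the longest border whose next element matches ----------

lemma kmpWhile_spec (s : List (Option String)) (pi : List Nat) (p : Nat)
    (hp1 : 1 ≤ p) (hp : p ≤ s.length)
    (hpi : ∀ t, t < p - 1 → pi.getD t 0 = maxBrd (s.take (t + 1)))
    (si : Option String) :
    ∀ f j, j ≤ f → BrdP (s.take p) j → j ≤ p - 1 →
      (∀ a, BrdP (s.take p) a → a ≤ p - 1 → s.getD a none = si → a ≤ j) →
      BrdP (s.take p) (kmpWhile pi s si f j) ∧ kmpWhile pi s si f j ≤ p - 1 ∧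
        (kmpWhile pi s si f j = 0 ∨ s.getD (kmpWhile pi s si f j) none = si) ∧
        (∀ a, BrdP (s.take p) a → a ≤ p - 1 → s.getD a none = si → a ≤ kmpWhile pi s si f j) := by
  intro f
  induction f with
  | zero =>
      intro j hjf hbj hjp hmax
      have hj0 : j = 0 := Nat.le_zero.mp hjf
      rw [kmpWhile]
      exact ⟨hbj, hjp, Or.inl hj0, hmax⟩
  | succ f ih =>
      intro j hjf hbj hjp hmax
      rw [kmpWhile]
      by_cases hc : j ≠ 0 ∧ ¬ (s.getD j none = si)
      · rw [if_pos hc]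
        have hj1 : 1 ≤ j := Nat.pos_of_ne_zero hc.1
        have hjm : j - 1 < p - 1 := by omega
        have hj' : pi.getD (j - 1) 0 = maxBrd (s.take j) := by
          have := hpi (j - 1) hjm
          rwa [show j - 1 + 1 = j from by omega] at this
        have hjlen : (s.take j).length = j := by rw [List.length_take]; omega
        have hb' : BrdP (s.take j) (pi.getD (j - 1) 0) := hj' ▸ maxBrd_brd (s.take j)
        have hle' : pi.getD (j - 1) 0 ≤ j - 1 := by
          rw [hj']
          have := maxBrd_le (s.take j)
          omega
        have hplen : (s.take p).length = p := by rw [List.length_take]; omega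
        have htt : (s.take p).take j = s.take j := by
          rw [List.take_take, Nat.min_eq_left (by omega)]
        refine ih (pi.getD (j - 1) 0) (by omega) ?_ (by omega) ?_
        · exact brd_up (s.take p) _ j hbj (by omega) (by rw [htt]; exact hb') (by omega)
        · intro a hba hap hsa
          have haj : a ≤ j := hmax a hba hap hsa
          have hanej : a ≠ j := fun h => hc.2 (h ▸ hsa)
          have hbdown : BrdP (s.take j) a := by
            rw [← htt]
            exact brd_down (s.take p) a j hba hbj (by omega) (by omega)
          have := maxBrd_ge (s.take j) a hbdown (by omega)
          omega
      · rw [if_neg hc]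
        rw [not_and_or, not_ne_iff, not_not] at hc
        exact ⟨hbj, hjp, hc, hmax⟩

lemma kmpStep_spec (s : List (Option String)) (pi : List Nat) (p : Nat)
    (hp1 : 1 ≤ p) (hp : p < s.length)
    (hpi : ∀ t, t < p - 1 → pi.getD t 0 = maxBrd (s.take (t + 1))) :
    kmpStep s (pi, maxBrd (s.take p)) p =
      (pi ++ [maxBrd (s.take (p + 1))], maxBrd (s.take (p + 1))) := by
  have hplen : (s.take p).length = p := by rw [List.length_take]; omega
  have hjp : maxBrd (s.take p) ≤ p - 1 := by
    have := maxBrd_le (s.take p); omega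
  obtain ⟨hbr, hrle, hror, hrmax⟩ := kmpWhile_spec s pi p hp1 (by omega) hpi
    (s.getD p none) (maxBrd (s.take p)) (maxBrd (s.take p)) le_rfl
    (maxBrd_brd (s.take p)) hjp
    (fun a hba hap _ => maxBrd_ge (s.take p) a hba (by omega))
  set r := kmpWhile pi s (s.getD p none) (maxBrd (s.take p)) (maxBrd (s.take p)) with hrdef
  have hlen1 : (s.take (p + 1)).length = p + 1 := by rw [List.length_take]; omega
  have hkey : maxBrd (s.take (p + 1)) =
      if s.getD p none = s.getD r none then r + 1 else r := by
    unfold maxBrd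
    simp only [hlen1, show p + 1 - 1 = p from rfl]
    by_cases hm : s.getD p none = s.getD r none
    · rw [if_pos hm]
      rw [Nat.findGreatest_eq_iff]
      refine ⟨by omega, fun _ => (brd_ext s p r hp (by omega)).mpr ⟨hbr, hm.symm⟩, ?_⟩
      intro n hn1 hn2 hbn
      match n, hn1 with
      | a + 1, hn1 =>
        obtain ⟨hba, hma⟩ := (brd_ext s p a hp (by omega)).mp hbn
        have := hrmax a hba (by omega) hma
        omega
    · rw [if_neg hm]
      have hr0 : r = 0 := by
        rcases hror with h | h
        · exact h
        · exact absurd h.symm hm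
      rw [hr0, Nat.findGreatest_eq_iff]
      refine ⟨by omega, fun h => absurd rfl h, ?_⟩
      intro n hn1 hn2 hbn
      match n, hn1 with
      | a + 1, _ =>
        obtain ⟨hba, hma⟩ := (brd_ext s p a hp (by omega)).mp hbn
        have ha0 : a = 0 := by
          have := hrmax a hba (by omega) hma
          omega
        rw [ha0] at hma
        exact hm (by rw [hr0]; exact hma.symm)
  show (pi ++ [if s.getD p none = s.getD r none then r + 1 else r],
      if s.getD p none = s.getD r none then r + 1 else r) = _
  rw [← hkey]

lemma kmpFold_inv (s : List (Option String)) :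
    ∀ n, n + 1 ≤ s.length →
      (List.range' 1 n).foldl (kmpStep s) ([0], 0) =
        ((List.range (n + 1)).map (fun t => maxBrd (s.take (t + 1))), maxBrd (s.take (n + 1))) := by
  intro n
  induction n with
  | zero =>
      intro h
      have h1 : maxBrd (s.take 1) = 0 := by
        unfold maxBrd
        simp only [List.length_take, show min 1 s.length - 1 = 0 from by omega,
          Nat.findGreatest_zero]
      simp [h1]
  | succ n ih =>
      intro h
      have hr : List.range' 1 (n + 1) = List.range' 1 n ++ [n + 1] := by
        rw [List.range'_concat, Nat.one_mul, Nat.add_comm 1 n]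
      rw [hr, List.foldl_append, ih (by omega)]
      simp only [List.foldl_cons, List.foldl_nil]
      have hpi : ∀ t, t < (n + 1) - 1 →
          ((List.range (n + 1)).map (fun t => maxBrd (s.take (t + 1)))).getD t 0 =
            maxBrd (s.take (t + 1)) := by
        intro t ht
        have htl : t < ((List.range (n + 1)).map (fun t => maxBrd (s.take (t + 1)))).length := by
          simp; omega
        rw [List.getD_eq_getElem _ _ htl, List.getElem_map, List.getElem_range]
      rw [kmpStep_spec s _ (n + 1) (by omega) (by omega) hpi]
      simp [List.range_succ]

lemma kmpPi_spec (s : List (Option String)) (hs : 1 ≤ s.length) :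
    (kmpPi s).2 = maxBrd s := by
  unfold kmpPi
  rw [kmpFold_inv s (s.length - 1) (by omega), show s.length - 1 + 1 = s.length from by omega]
  simp [List.take_length]

-- ---------- the sentinel list's longest border is the longest word overlap ----------

abbrev OvP (ws nw : List String) (i : Nat) : Prop := ws.drop (ws.length - i) = nw.take i

lemma ovA_eq_findGreatest (ws nw : List String) :
    ∀ k, k ≤ ws.length → mergeOverlapA ws nw k = Nat.findGreatest (OvP ws nw) k := by
  intro k
  induction k with
  | zero => intro _; rw [Nat.findGreatest_zero]; rfl
  | succ k ih =>
      intro hk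
      rw [Nat.findGreatest_succ]
      show (if PySem.List.slice ws (some (-((k + 1 : Nat) : Int))) none ==
          PySem.List.slice nw none (some ((k + 1 : Nat) : Int)) then k + 1
        else mergeOverlapA ws nw k) = _
      rw [PySem.List.slice_from_neg_natCast ws (k + 1) (by omega),
        PySem.List.slice_to_natCast]
      by_cases h : ws.drop (ws.length - (k + 1)) = nw.take (k + 1)
      · rw [if_pos h, if_pos (by simpa [beq_iff_eq] using h)]
      · rw [if_neg h, if_neg (by simpa [beq_iff_eq] using h), ih (by omega)]

lemma maxBrd_sentinel_aux (ws nw t : List String) (u : List (Option String)) (k : Nat)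
    (hkm : k ≤ ws.length) (hkn : k ≤ nw.length)
    (ht : t = ws.drop (ws.length - k))
    (hu : u = nw.map some ++ none :: t.map some) :
    maxBrd u = Nat.findGreatest (OvP ws nw) k := by
  have htlen : t.length = k := by rw [ht, List.length_drop]; omega
  have hulen : u.length = nw.length + (k + 1) := by
    rw [hu]; simp [htlen]
  -- the only None in u sits at index nw.length
  have hget_none : u[nw.length]? = some none := by
    rw [hu, List.getElem?_append_right (by simp), List.length_map]
    simp
  have hget_some : ∀ idx, idx < nw.length + (k + 1) → idx ≠ nw.length →
      ∃ w, u[idx]? = some (some w) := by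
    intro idx hidx hne
    rcases Nat.lt_or_ge idx nw.length with hlt | hge
    · refine ⟨nw[idx], ?_⟩
      rw [hu, List.getElem?_append_left (by simpa using hlt), List.getElem?_map,
        List.getElem?_eq_getElem hlt]
      rfl
    · have hlt' : idx - nw.length - 1 < t.length := by omega
      have hstep : u[idx]? = (t.map some)[idx - nw.length - 1]? := by
        rw [hu, List.getElem?_append_right (by simpa using hge), List.length_map,
          show idx - nw.length = (idx - nw.length - 1) + 1 from by omega,
          List.getElem?_cons_succ]
        norm_num
      exact ⟨t[idx - nw.length - 1]'hlt',
        by rw [hstep, List.getElem?_map, List.getElem?_eq_getElem hlt']; rfl⟩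
  -- borders of length ≤ k are exactly word overlaps
  have hE1 : ∀ i, i ≤ k → (BrdP u i ↔ OvP ws nw i) := by
    intro i hik
    have h1 : u.take i = (nw.take i).map some := by
      rw [hu, List.take_append_of_le_length (by rw [List.length_map]; omega), List.map_take]
    have h2 : u.drop (u.length - i) = (t.drop (k - i)).map some := by
      rw [hu]
      rw [show (nw.map some ++ none :: t.map some).length - i =
          nw.length + ((k + 1) - i) from by simp [htlen]; omega]
      rw [List.drop_append, List.drop_eq_nil_of_le (by rw [List.length_map]; omega),
        List.nil_append,
        show nw.length + ((k + 1) - i) - (nw.map some).length = (k - i) + 1 from by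
          rw [List.length_map]; omega,
        List.drop_succ_cons, List.map_drop]
    have h3 : t.drop (k - i) = ws.drop (ws.length - i) := by
      rw [ht, List.drop_drop]
      congr 1
      omega
    unfold BrdP OvP
    rw [h1, h2, h3]
    constructor
    · intro h
      exact ((List.map_injective_iff.mpr (Option.some_injective String)) h).symm
    · intro h
      rw [h]
  -- no border longer than k
  have hE2 : ∀ i, k < i → i ≤ nw.length + k → ¬ BrdP u i := by
    intro i hki hink hB
    unfold BrdP at hB
    rcases Nat.lt_or_ge nw.length i with hni | hin
    · have heq := congrArg (fun l => l[nw.length]?) hB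
      simp only [List.getElem?_take, if_pos hni, List.getElem?_drop] at heq
      obtain ⟨w, hw⟩ := hget_some (u.length - i + nw.length) (by omega) (by omega)
      rw [hw, hget_none] at heq
      simp at heq
    · have hidx : i - k - 1 < i := by omega
      have heq := congrArg (fun l => l[i - k - 1]?) hB
      simp only [List.getElem?_take, if_pos hidx, List.getElem?_drop] at heq
      obtain ⟨w, hw⟩ := hget_some (i - k - 1) (by omega) (by omega)
      rw [hw, show u.length - i + (i - k - 1) = nw.length from by rw [hulen]; omega,
        hget_none] at heq
      simp at heq
  -- conclude
  obtain ⟨hVk, hVp, hVmax⟩ := (Nat.findGreatest_eq_iff (P := OvP ws nw) (k := k)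
    (m := Nat.findGreatest (OvP ws nw) k)).mp rfl
  unfold maxBrd
  have hb : u.length - 1 = nw.length + k := by omega
  simp only [hb]
  rw [Nat.findGreatest_eq_iff]
  refine ⟨by omega, ?_, ?_⟩
  · intro hne
    exact (hE1 _ hVk).mpr (hVp hne)
  · intro a ha1 ha2 hBa
    rcases Nat.lt_or_ge k a with hka | hak
    · exact hE2 a hka ha2 hBa
    · exact hVmax ha1 hak ((hE1 a hak).mp hBa)

lemma maxBrd_sentinel (ws nw : List String) :
    maxBrd (nw.map some ++ none :: ((ws.drop (ws.length - min ws.length nw.length)).map some)) =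
      Nat.findGreatest (OvP ws nw) (min ws.length nw.length) :=
  maxBrd_sentinel_aux ws nw _ _ _ (Nat.min_le_left _ _) (Nat.min_le_right _ _) rfl rfl

-- B's step equals A's step recast on the incremental state
lemma stepB_eq (parts ws : List String) (t : String) :
    mergeStepB (parts, ws) t =
      (parts ++ [PySem.Str.join " " (PySem.List.slice (PySem.Str.split₀ t)
          (some ((mergeOverlapA ws (PySem.Str.split₀ t)
            (min ws.length (PySem.Str.split₀ t).length) : Nat) : Int)) none)],
       ws ++ PySem.List.slice (PySem.Str.split₀ t)
          (some ((mergeOverlapA ws (PySem.Str.split₀ t)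
            (min ws.length (PySem.Str.split₀ t).length) : Nat) : Int)) none) := by
  have hkm : min ws.length (PySem.Str.split₀ t).length ≤ ws.length := Nat.min_le_left _ _
  have hslice : PySem.List.slice ws
      (some ((ws.length : Int) - ((min ws.length (PySem.Str.split₀ t).length : Nat) : Int))) none
      = ws.drop (ws.length - min ws.length (PySem.Str.split₀ t).length) := by
    rw [PySem.List.slice_from ws (by omega)]
    congr 1
    exact Int.toNat_sub _ _
  have hov : (kmpPi ((PySem.Str.split₀ t).map some ++ none ::
        ((ws.drop (ws.length - min ws.length (PySem.Str.split₀ t).length)).map some))).2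
      = mergeOverlapA ws (PySem.Str.split₀ t) (min ws.length (PySem.Str.split₀ t).length) := by
    rw [kmpPi_spec _ (by simp; omega), maxBrd_sentinel,
      ovA_eq_findGreatest ws (PySem.Str.split₀ t) _ hkm]
  simp only [mergeStepB, hslice, hov]

-- ---------- splitting / joining infrastructure (relates A's re-split merged string to B's word list) ----------

-- a word produced by str.split(): nonempty, no whitespace
def WordOK (w : List Char) : Prop := w ≠ [] ∧ ∀ c ∈ w, PySem.Chars.isspace c = false

lemma go_acc (s : List Char) : ∀ (cur : List Char) (acc : List (List Char)),
    PySem.Chars.split₀.go s cur acc = acc.reverse ++ PySem.Chars.split₀.go s cur [] := by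
  induction s with
  | nil =>
      intro cur acc
      simp only [PySem.Chars.split₀.go]
      by_cases h : cur.isEmpty <;> simp [h]
  | cons c rest ih =>
      intro cur acc
      rw [PySem.Chars.split₀.go, PySem.Chars.split₀.go]
      by_cases hs : PySem.Chars.isspace c
      · by_cases h : cur.isEmpty
        · simp only [hs, h, if_true]
          exact ih [] acc
        · simp only [hs, h, if_true, Bool.false_eq_true, if_false]
          rw [ih [] (cur.reverse :: acc), ih [] [cur.reverse]]
          simp
      · simp only [hs, Bool.false_eq_true, if_false]
        exact ih _ _

lemma go_append_space (a : List Char) : ∀ (cur : List Char) (acc : List (List Char)) (b : List Char),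
    PySem.Chars.split₀.go (a ++ ' ' :: b) cur acc =
      PySem.Chars.split₀.go a cur acc ++ PySem.Chars.split₀ b := by
  induction a with
  | nil =>
      intro cur acc b
      simp only [List.nil_append]
      rw [PySem.Chars.split₀.go, PySem.Chars.split₀.go]
      have hsp : PySem.Chars.isspace ' ' = true := by decide
      by_cases h : cur.isEmpty
      · simp only [hsp, h, if_true]
        rw [go_acc b [] acc]
        rfl
      · simp only [hsp, h, if_true, Bool.false_eq_true, if_false]
        rw [go_acc b [] (cur.reverse :: acc)]
        simp [PySem.Chars.split₀]
  | cons c rest ih =>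
      intro cur acc b
      simp only [List.cons_append]
      rw [PySem.Chars.split₀.go, PySem.Chars.split₀.go]
      by_cases hs : PySem.Chars.isspace c
      · by_cases h : cur.isEmpty <;> simp only [hs, h, if_true, Bool.false_eq_true, if_false] <;>
          exact ih _ _ _
      · simp only [hs, Bool.false_eq_true, if_false]
        exact ih _ _ _

lemma split₀_append_space (a b : List Char) :
    PySem.Chars.split₀ (a ++ ' ' :: b) = PySem.Chars.split₀ a ++ PySem.Chars.split₀ b := by
  unfold PySem.Chars.split₀
  exact go_append_space a [] [] b

lemma go_word (w : List Char) (hw : ∀ c ∈ w, PySem.Chars.isspace c = false) :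
    ∀ (s cur : List Char) (acc : List (List Char)),
    PySem.Chars.split₀.go (w ++ s) cur acc = PySem.Chars.split₀.go s (w.reverse ++ cur) acc := by
  induction w with
  | nil => intro s cur acc; simp
  | cons c rest ih =>
      intro s cur acc
      have hc : PySem.Chars.isspace c = false := hw c (by simp)
      simp only [List.cons_append]
      rw [PySem.Chars.split₀.go]
      simp only [hc, Bool.false_eq_true, if_false]
      rw [ih (fun d hd => hw d (by simp [hd])) s (c :: cur) acc]
      simp

lemma split₀_single (w : List Char) (hw : WordOK w) : PySem.Chars.split₀ w = [w] := by
  unfold PySem.Chars.split₀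
  have hgo := go_word w hw.2 [] [] []
  simp only [List.append_nil] at hgo
  rw [hgo, PySem.Chars.split₀.go]
  have hne : (w.reverse ++ []).isEmpty = false := by
    cases w with
    | nil => exact absurd rfl hw.1
    | cons c t => simp
  simp
  exact hw.1

lemma split₀_join_clean (ls : List (List Char)) (h : ∀ l ∈ ls, WordOK l) :
    PySem.Chars.split₀ (PySem.Chars.join [' '] ls) = ls := by
  induction ls with
  | nil => rw [PySem.Chars.join_nil]; decide
  | cons w t ih =>
      cases t with
      | nil => rw [PySem.Chars.join_singleton]; exact split₀_single w (h w (by simp))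
      | cons w' t' =>
          rw [PySem.Chars.join_cons_cons]
          rw [show w ++ [' '] ++ PySem.Chars.join [' '] (w' :: t') =
              w ++ ' ' :: PySem.Chars.join [' '] (w' :: t') from by simp]
          rw [split₀_append_space, split₀_single w (h w (by simp)),
              ih (fun l hl => h l (by simp [hl]))]
          simp

lemma go_clean (s : List Char) : ∀ (cur : List Char) (acc : List (List Char)),
    (∀ c ∈ cur, PySem.Chars.isspace c = false) →
    (∀ x ∈ acc, WordOK x) →
    ∀ w ∈ PySem.Chars.split₀.go s cur acc, WordOK w := by
  induction s with
  | nil =>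
      intro cur acc hcur hacc w hw
      rw [PySem.Chars.split₀.go] at hw
      by_cases h : cur.isEmpty
      · simp only [h, if_true, List.mem_reverse] at hw
        exact hacc w hw
      · simp only [h, Bool.false_eq_true, if_false, List.mem_reverse, List.mem_cons] at hw
        rcases hw with hw | hw
        · subst hw
          refine ⟨by simpa [List.isEmpty_iff] using h, ?_⟩
          intro c hc; exact hcur c (by simpa using hc)
        · exact hacc w hw
  | cons c rest ih =>
      intro cur acc hcur hacc w hw
      rw [PySem.Chars.split₀.go] at hw
      by_cases hs : PySem.Chars.isspace c
      · by_cases h : cur.isEmpty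
        · simp only [hs, h, if_true] at hw
          exact ih [] acc (by simp) hacc w hw
        · simp only [hs, h, if_true, Bool.false_eq_true, if_false] at hw
          refine ih [] (cur.reverse :: acc) (by simp) ?_ w hw
          intro x hx
          rcases List.mem_cons.mp hx with hx | hx
          · subst hx
            refine ⟨by simpa [List.isEmpty_iff] using h, ?_⟩
            intro d hd; exact hcur d (by simpa using hd)
          · exact hacc x hx
      · simp only [hs, Bool.false_eq_true, if_false] at hw
        refine ih (c :: cur) acc ?_ hacc w hw
        intro d hd
        rcases List.mem_cons.mp hd with hd | hd
        · subst hd; simpa using hs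
        · exact hcur d hd

lemma strSplit_clean (s w : String) (h : w ∈ PySem.Str.split₀ s) : WordOK w.toList := by
  have hmem : w.toList ∈ PySem.Chars.split₀ s.toList := by
    rw [← PySem.Str.split₀_map_toList]
    exact List.mem_map_of_mem h
  exact go_clean s.toList [] [] (by simp) (by simp) _ hmem

lemma charsJoin_snoc (sep x : List Char) : ∀ (ls : List (List Char)), ls ≠ [] →
    PySem.Chars.join sep (ls ++ [x]) = PySem.Chars.join sep ls ++ sep ++ x := by
  intro ls
  induction ls with
  | nil => intro h; exact absurd rfl h
  | cons a t ih =>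
      intro _
      cases t with
      | nil => simp [PySem.Chars.join_cons_cons, PySem.Chars.join_singleton]
      | cons b t' =>
          rw [show (a :: b :: t') ++ [x] = a :: ((b :: t') ++ [x]) from by simp,
            show (b :: t') ++ [x] = b :: (t' ++ [x]) from by simp,
            PySem.Chars.join_cons_cons,
            show b :: (t' ++ [x]) = (b :: t') ++ [x] from by simp,
            ih (by simp), PySem.Chars.join_cons_cons]
          simp

lemma strJoin_snoc (parts : List String) (p : String) (h : parts ≠ []) :
    PySem.Str.join " " (parts ++ [p]) = PySem.Str.join " " parts ++ " " ++ p := by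
  apply String.toList_inj.mp
  simp only [PySem.Str.toList_join, String.toList_append, List.map_append, List.map_cons,
    List.map_nil]
  rw [charsJoin_snoc " ".toList p.toList (parts.map String.toList) (by simpa using h)]

lemma strSplit_merge (m : String) (tail : List String)
    (hclean : ∀ w ∈ tail, WordOK w.toList) :
    PySem.Str.split₀ (m ++ " " ++ PySem.Str.join " " tail) = PySem.Str.split₀ m ++ tail := by
  have htl : (m ++ " " ++ PySem.Str.join " " tail).toList =
      m.toList ++ ' ' :: PySem.Chars.join [' '] (tail.map String.toList) := by
    simp [String.toList_append, PySem.Str.toList_join]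
  simp only [PySem.Str.split₀]
  rw [htl, split₀_append_space,
    split₀_join_clean (tail.map String.toList)
      (by intro l hl; rcases List.mem_map.mp hl with ⟨w, hw, rfl⟩; exact hclean w hw),
    List.map_append, List.map_map]
  have : (String.ofList ∘ String.toList) = id := by
    funext s; simp [String.ofList_toList]
  rw [this]
  simp

lemma main_fold : ∀ (rest : List String) (merged : String) (parts ws : List String),
    parts ≠ [] → merged = PySem.Str.join " " parts → ws = PySem.Str.split₀ merged →
    rest.foldl mergeStepA merged =
      PySem.Str.join " " ((rest.foldl mergeStepB (parts, ws)).1) := by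
  intro rest
  induction rest with
  | nil =>
      intro merged parts ws hne hm _
      simpa using hm
  | cons t r ih =>
      intro merged parts ws hne hm hw
      simp only [List.foldl_cons]
      have hstepA : mergeStepA merged t =
          merged ++ " " ++ PySem.Str.join " "
            (PySem.List.slice (PySem.Str.split₀ t)
              (some ((mergeOverlapA ws (PySem.Str.split₀ t)
                (min ws.length (PySem.Str.split₀ t).length) : Nat) : Int)) none) := by
        simp only [mergeStepA]
        rw [← hw]
      set tail := PySem.List.slice (PySem.Str.split₀ t)
          (some ((mergeOverlapA ws (PySem.Str.split₀ t)
            (min ws.length (PySem.Str.split₀ t).length) : Nat) : Int)) none with htail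
      have hclean : ∀ w ∈ tail, WordOK w.toList := by
        intro w hwmem
        exact strSplit_clean t w (PySem.List.mem_of_mem_slice _ _ _ hwmem)
      rw [hstepA, stepB_eq parts ws t, ← htail]
      exact ih (merged ++ " " ++ PySem.Str.join " " tail) (parts ++ [PySem.Str.join " " tail])
        (ws ++ tail) (by simp)
        (by rw [hm, strJoin_snoc parts _ hne, ← hm])
        (by rw [strSplit_merge merged tail hclean, hw])

lemma join_singleton_str (s : String) : PySem.Str.join " " [s] = s := by
  apply String.toList_inj.mp
  simp [PySem.Str.toList_join, PySem.Chars.join_singleton]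

-- ===== VERDICT (by name: the statement is the Claim_ definition above) =====
theorem merge_texts_spec : Claim_equal_merge_texts := by
  intro texts _ hpre
  unfold Spec_merge_texts
  match texts with
  | [] => exact absurd rfl hpre
  | first :: rest =>
      show merge_texts (first :: rest) = merge_texts_alt (first :: rest)
      unfold merge_texts merge_texts_alt
      have hget : PySem.List.pyGet? (first :: rest) 0 = some first := by
        simp [PySem.List.pyGet?, PySem.List.pyIdx?]
      rw [hget, PySem.List.slice_from_one]
      exact main_fold rest first [first] (PySem.Str.split₀ first) (by simp)
        (join_singleton_str first).symm rfl
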